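-- pv_equiv track=rewrite | github.com/abhijitsharma/blog | word_puzzle/code/word_puzzle.py | reverse_ngram
-- ===== SOURCE A (Python) =====
-- def reverse_ngram(ngrams: list, num_reps=2):
--     result = []
--     for i in range(len(ngrams)):
--         r = []
--         j = i + 1
--         for k in range(j, len(ngrams)):
--             rev = ngrams[k][::-1]
--             if ngrams[i] == rev and len(r) < num_reps:
--                 if len(r) == 0:
--                     r.append(ngrams[i])
--                 r.append(ngrams[k])
--         if len(r) == num_reps:
--             result.append(r)
--     return result
-- ===== SOURCE B (Python) =====
-- def reverse_ngram(ngrams: list, num_reps=2):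
--     # One right-to-left pass with a suffix counter: at position i every later
--     # match equals ngrams[i][::-1], so a count of it in the suffix decides the row.
--     if num_reps < 2:
--         return []
--     cnt = {}
--     rows = []
--     for s in reversed(ngrams):
--         if cnt.get(s[::-1], 0) >= num_reps - 1:
--             rows.append([s] + [s[::-1]] * (num_reps - 1))
--         cnt[s] = cnt.get(s, 0) + 1
--     rows.reverse()
--     return rows
-- ===== Notes on version B (the rewrite author's own statement) =====
-- stated objective: faster
-- what changed: A scans all later positions for every index (quadratic); B makes one right-to-left pass keeping a dict of suffix occurrence counts and, since every match of ngrams[i] is literally its reversal, emits [s] + [s[::-1]]*(num_reps-1) whenever the suffix count of s[::-1] reaches num_reps-1.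
-- intended difference: When num_reps == 0 and ngrams is non-empty, A returns one empty group per element (its final len(r)==num_reps test accidentally accepts the never-grown empty r at every index), while B returns an empty result, the intended 'no groups' answer for a meaningless group size. — e.g. on reverse_ngram(["ab"], 0): A returns [[]], B returns []
import Mathlib
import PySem

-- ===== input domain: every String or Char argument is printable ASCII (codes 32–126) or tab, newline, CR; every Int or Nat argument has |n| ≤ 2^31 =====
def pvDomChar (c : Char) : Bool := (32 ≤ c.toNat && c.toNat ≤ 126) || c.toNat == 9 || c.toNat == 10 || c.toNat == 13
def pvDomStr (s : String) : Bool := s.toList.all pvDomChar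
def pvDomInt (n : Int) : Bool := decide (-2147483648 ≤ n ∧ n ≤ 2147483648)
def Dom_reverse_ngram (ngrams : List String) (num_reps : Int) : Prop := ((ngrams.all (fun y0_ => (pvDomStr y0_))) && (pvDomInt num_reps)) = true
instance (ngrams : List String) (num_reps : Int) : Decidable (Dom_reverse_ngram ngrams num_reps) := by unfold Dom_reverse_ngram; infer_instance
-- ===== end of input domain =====

-- B replaces A's quadratic scan of all later positions by one right-to-left pass keeping a
-- dict of suffix occurrence counts (every later match of s is literally s reversed).

-- s[::-1] on a string is exactly string reversal (helper used by both ports)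
def pyStrRev (s : String) : String := String.ofList s.toList.reverse

-- ===== PORT A =====
-- A's inner-loop body: rev = ngrams[k][::-1]; if ngrams[i] == rev and len(r) < num_reps: …
def innerCore (s : String) (num_reps : Int) (r : List String) (t : String) : List String :=
  if s = pyStrRev t ∧ (r.length : Int) < num_reps then
    (if r.length = 0 then r ++ [s] else r) ++ [t]
  else r

-- A's outer-loop body: the inner loop over range(i+1, len(ngrams)), then the final length test
def outerStepA (ngrams : List String) (num_reps : Int) (result : List (List String)) (i : Int) :
    List (List String) :=
  let r := (PySem.List.pyRange (i + 1) (PySem.List.len ngrams)).foldl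
    (fun r k => innerCore (PySem.List.pyGetD ngrams i "") num_reps r (PySem.List.pyGetD ngrams k "")) []
  if (r.length : Int) = num_reps then result ++ [r] else result

def reverse_ngram (ngrams : List String) (num_reps : Int) : List (List String) :=
  (PySem.List.pyRange 0 (PySem.List.len ngrams)).foldl (outerStepA ngrams num_reps) []

-- ===== PORT B =====
-- B's loop body: emit a group when the suffix count of s[::-1] reaches num_reps-1, then count s
def stepB (num_reps : Int) (st : PySem.Dict String Int × List (List String)) (s : String) :
    PySem.Dict String Int × List (List String) :=
  let rows := if num_reps - 1 ≤ st.1.getD (pyStrRev s) 0 then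
      st.2 ++ [s :: List.replicate (num_reps - 1).toNat (pyStrRev s)]
    else st.2
  (st.1.insert s (st.1.getD s 0 + 1), rows)

def reverse_ngram_alt (ngrams : List String) (num_reps : Int) : List (List String) :=
  if num_reps < 2 then []
  else ((ngrams.reverse.foldl (stepB num_reps) (PySem.Dict.empty, [])).2).reverse

-- ===== PRECONDITION & SPEC =====
-- When num_reps == 0 and ngrams is non-empty, A returns one empty group per element (its
-- final len(r)==num_reps test accidentally accepts the never-grown empty r at every index),
-- while B returns an empty result, the intended 'no groups' answer for a meaningless group size.
def D_reverse_ngram (ngrams : List String) (num_reps : Int) : Prop :=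
  num_reps = 0 ∧ ngrams ≠ []
instance (ngrams : List String) (num_reps : Int) : Decidable (D_reverse_ngram ngrams num_reps) := by
  unfold D_reverse_ngram; infer_instance

def Spec_reverse_ngram (ngrams : List String) (num_reps : Int) (out : List (List String)) : Prop :=
  ¬ D_reverse_ngram ngrams num_reps → out = reverse_ngram_alt ngrams num_reps
instance (ngrams : List String) (num_reps : Int) (out : List (List String)) :
    Decidable (Spec_reverse_ngram ngrams num_reps out) := by
  unfold Spec_reverse_ngram; infer_instance

def pvDiffWitness_reverse_ngram : List String × Int := (["ab"], 0)
def pvDiffWitnessOut_reverse_ngram : (List (List String)) × (List (List String)) := ([[]], [])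

-- ===== CLAIM (what is proved, stated in full; the proofs are below) =====
def Claim_unchanged_reverse_ngram : Prop := ∀ (ngrams : List String) (num_reps : Int), Dom_reverse_ngram ngrams num_reps → Spec_reverse_ngram ngrams num_reps (reverse_ngram ngrams num_reps)
def Claim_changed_reverse_ngram : Prop := Dom_reverse_ngram (pvDiffWitness_reverse_ngram.1) (pvDiffWitness_reverse_ngram.2) ∧ D_reverse_ngram (pvDiffWitness_reverse_ngram.1) (pvDiffWitness_reverse_ngram.2) ∧ reverse_ngram (pvDiffWitness_reverse_ngram.1) (pvDiffWitness_reverse_ngram.2) = pvDiffWitnessOut_reverse_ngram.1 ∧ reverse_ngram_alt (pvDiffWitness_reverse_ngram.1) (pvDiffWitness_reverse_ngram.2) = pvDiffWitnessOut_reverse_ngram.2 ∧ pvDiffWitnessOut_reverse_ngram.1 ≠ pvDiffWitnessOut_reverse_ngram.2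
def Claim_exact_reverse_ngram : Prop := ∀ (ngrams : List String) (num_reps : Int), Dom_reverse_ngram ngrams num_reps → D_reverse_ngram ngrams num_reps → reverse_ngram ngrams num_reps ≠ reverse_ngram_alt ngrams num_reps

-- ===== LEMMAS AND PROOFS =====

theorem pyStrRev_invol (s : String) : pyStrRev (pyStrRev s) = s := by
  simp [pyStrRev]

theorem pyStrRev_eq_iff (s t : String) : s = pyStrRev t ↔ pyStrRev s = t := by
  constructor
  · rintro rfl; exact pyStrRev_invol t
  · rintro rfl; exact (pyStrRev_invol s).symm

-- common reference shape: the groups of both programs, in forward order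
def spineRows (nr : Int) : List String → List (List String)
  | [] => []
  | s :: xs =>
      (if 2 ≤ nr ∧ nr - 1 ≤ (xs.count (pyStrRev s) : Int) then
        [s :: List.replicate (nr - 1).toNat (pyStrRev s)]
      else []) ++ spineRows nr xs

theorem spineRows_of_lt (nr : Int) (h : nr < 2) : ∀ l, spineRows nr l = [] := by
  intro l; induction l with
  | nil => rfl
  | cons s xs ih => simp [spineRows, ih]; omega

-- A's inner loop from a non-empty r appends the next (num_reps - len r) later reversals
theorem innerNe (s : String) (nr : Int) :
    ∀ (l : List String) (r : List String), r ≠ [] →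
      l.foldl (innerCore s nr) r =
        r ++ List.replicate (min (nr - r.length).toNat (l.count (pyStrRev s))) (pyStrRev s) := by
  intro l
  induction l with
  | nil => intro r _; simp
  | cons t rest ih =>
    intro r hr
    by_cases hm : s = pyStrRev t
    · have ht : t = pyStrRev s := ((pyStrRev_eq_iff s t).mp hm).symm
      by_cases hlen : (r.length : Int) < nr
      · have hstep : innerCore s nr r t = r ++ [t] := by
          simp [innerCore, hm, hlen, List.length_eq_zero_iff, hr]
        rw [List.foldl_cons, hstep, ih (r ++ [t]) (by simp)]
        subst ht
        simp only [List.count_cons_self, List.length_append, List.length_cons, List.length_nil]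
        have h1 : (nr - r.length).toNat = (nr - (r.length + 1)).toNat + 1 := by omega
        have h2 : ∀ m : Nat, min ((nr - (r.length + 1)).toNat + 1) (m + 1)
            = min (nr - (r.length + 1)).toNat m + 1 := by omega
        rw [h1, h2, List.replicate_succ]
        push_cast
        simp
      · have hstep : innerCore s nr r t = r := by simp [innerCore, hlen]
        rw [List.foldl_cons, hstep, ih r hr]
        have h0 : (nr - r.length).toNat = 0 := by omega
        simp [h0]
    · have hstep : innerCore s nr r t = r := by simp [innerCore, hm]
      have htne : t ≠ pyStrRev s := fun h => hm ((pyStrRev_eq_iff s t).mpr h.symm)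
      have hcnt : (t :: rest).count (pyStrRev s) = rest.count (pyStrRev s) := by
        simp [htne]
      rw [List.foldl_cons, hstep, hcnt, ih r hr]

theorem inner_nonpos (s : String) (nr : Int) (hnr : nr ≤ 0) :
    ∀ l : List String, l.foldl (innerCore s nr) [] = [] := by
  intro l; induction l with
  | nil => rfl
  | cons t rest ih =>
    have hstep : innerCore s nr [] t = [] := by
      simp only [innerCore]; rw [if_neg (by simp; omega)]
    rw [List.foldl_cons, hstep]; exact ih

-- A's inner loop from r = []: the head, the first match, then up to num_reps-2 more matches
theorem innerNil (s : String) (nr : Int) (hnr : 1 ≤ nr) :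
    ∀ l : List String,
      l.foldl (innerCore s nr) [] =
        if l.count (pyStrRev s) = 0 then []
        else s :: pyStrRev s ::
          List.replicate (min (nr - 2).toNat (l.count (pyStrRev s) - 1)) (pyStrRev s) := by
  intro l; induction l with
  | nil => rfl
  | cons t rest ih =>
    by_cases hm : s = pyStrRev t
    · have ht : t = pyStrRev s := ((pyStrRev_eq_iff s t).mp hm).symm
      have hstep : innerCore s nr [] t = [s, t] := by
        simp [innerCore, hm]; omega
      rw [List.foldl_cons, hstep, innerNe s nr rest [s, t] (by simp)]
      subst ht
      simp only [List.count_cons_self, List.length_cons, List.length_nil]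
      rw [if_neg (by omega)]
      norm_num
    · have hstep : innerCore s nr [] t = [] := by simp [innerCore, hm]
      have htne : t ≠ pyStrRev s := fun h => hm ((pyStrRev_eq_iff s t).mpr h.symm)
      have hcnt : (t :: rest).count (pyStrRev s) = rest.count (pyStrRev s) := by
        simp [htne]
      rw [List.foldl_cons, hstep, hcnt]; exact ih

-- A's outer loop from index j produces exactly the spine of the remaining suffix
theorem outerA (ngrams : List String) (nr : Int) (hnr : nr ≠ 0) :
    ∀ (l : List String) (j : Nat) (res : List (List String)), ngrams.drop j = l →
      (PySem.List.pyRange (j : Int) (PySem.List.len ngrams)).foldl (outerStepA ngrams nr) res =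
        res ++ spineRows nr l := by
  intro l
  induction l with
  | nil =>
    intro j res hdrop
    have hj : ngrams.length ≤ j := by
      by_contra h
      exact absurd hdrop (by simp [List.drop_eq_nil_iff]; omega)
    rw [PySem.List.pyRange_one_eq_nil (by rw [PySem.List.len_eq]; exact_mod_cast hj)]
    simp [spineRows]
  | cons s xs ih =>
    intro j res hdrop
    have hj : j < ngrams.length := by
      by_contra h
      rw [List.drop_eq_nil_iff.mpr (by omega)] at hdrop
      exact (List.cons_ne_nil s xs) hdrop.symm
    have hsome : ngrams[j]? = some s := by
      have h0 : (List.drop j ngrams)[0]? = ngrams[j + 0]? := List.getElem?_drop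
      rw [hdrop] at h0
      simpa using h0.symm
    have hget : PySem.List.pyGetD ngrams (j : Int) "" = s := by
      rw [PySem.List.pyGetD_natCast, List.getD_eq_getElem?_getD, hsome]
      rfl
    have hdrop1 : ngrams.drop (j + 1) = xs := by
      have := congrArg List.tail hdrop
      simpa [← List.tail_drop] using this
    rw [PySem.List.pyRange_one_cons (by rw [PySem.List.len_eq]; exact_mod_cast hj)]
    rw [List.foldl_cons]
    have hinner : outerStepA ngrams nr res (j : Int) =
        res ++ (if 2 ≤ nr ∧ nr - 1 ≤ (xs.count (pyStrRev s) : Int) then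
          [s :: List.replicate (nr - 1).toNat (pyStrRev s)] else []) := by
      unfold outerStepA
      rw [hget, show ((j : Int) + 1) = ((j + 1 : Nat) : Int) by push_cast; ring,
        PySem.List.foldl_pyRange_pyGetD ngrams "" (innerCore s nr) [] (by positivity),
        Int.toNat_natCast, hdrop1]
      by_cases h1 : 1 ≤ nr
      · rw [innerNil s nr h1 xs]
        by_cases hm0 : xs.count (pyStrRev s) = 0
        · rw [if_pos hm0, if_neg (by simp; omega), if_neg (by rw [hm0]; omega)]
          simp
        · rw [if_neg hm0]
          by_cases hcond : 2 ≤ nr ∧ nr - 1 ≤ (xs.count (pyStrRev s) : Int)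
          · rw [if_pos (by
                simp only [List.length_cons, List.length_replicate]
                push_cast
                omega),
              if_pos hcond]
            have h2 : (nr - 1).toNat = (nr - 2).toNat + 1 := by omega
            have h3 : min (nr - 2).toNat (xs.count (pyStrRev s) - 1) = (nr - 2).toNat := by
              omega
            rw [h3, h2, List.replicate_succ]
          · rw [if_neg (by
                simp only [List.length_cons, List.length_replicate]
                push_cast
                omega),
              if_neg hcond]
            simp
      · rw [inner_nonpos s nr (by omega) xs]
        rw [if_neg (by simp; omega), if_neg (by omega)]
        simp
    rw [hinner,
      show ((j : Int) + 1) = ((j + 1 : Nat) : Int) by push_cast; ring,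
      ih (j + 1) _ hdrop1]
    simp [spineRows]

-- spine with counts shifted by a base counter, as B's loop sees them
def spineRowsF (nr : Int) (f : String → Int) : List String → List (List String)
  | [] => []
  | s :: xs =>
      (if nr - 1 ≤ f (pyStrRev s) + (xs.count (pyStrRev s) : Int) then
        [s :: List.replicate (nr - 1).toNat (pyStrRev s)]
      else []) ++ spineRowsF nr f xs

-- B's loop invariant: the dict holds suffix counts, rows accumulate the spine reversed
theorem bLoop (nr : Int) :
    ∀ (xs : List String) (cnt : PySem.Dict String Int) (rows : List (List String)),
      (xs.reverse.foldl (stepB nr) (cnt, rows)).2 =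
        rows ++ (spineRowsF nr (fun t => cnt.getD t 0) xs).reverse ∧
      ∀ t, (xs.reverse.foldl (stepB nr) (cnt, rows)).1.getD t 0 =
        cnt.getD t 0 + xs.count t := by
  intro xs
  induction xs with
  | nil => intro cnt rows; constructor <;> simp [spineRowsF]
  | cons s xs ih =>
    intro cnt rows
    rw [List.reverse_cons, List.foldl_append]
    obtain ⟨ih2, ih1⟩ := ih cnt rows
    constructor
    · rw [List.foldl_cons, List.foldl_nil]
      show (stepB nr _ s).2 = _
      rw [stepB]
      simp only [ih2, ih1 (pyStrRev s), spineRowsF]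
      by_cases hc : nr - 1 ≤ cnt.getD (pyStrRev s) 0 + (xs.count (pyStrRev s) : Int)
      · rw [if_pos hc, if_pos hc]
        simp
      · rw [if_neg hc, if_neg hc]
        simp
    · intro t
      rw [List.foldl_cons, List.foldl_nil]
      show ((stepB nr _ s).1).getD t 0 = _
      rw [stepB]
      simp only [PySem.Dict.getD_insert, ih1]
      by_cases ht : t = s
      · subst ht
        simp [List.count_cons_self]
        ring
      · rw [if_neg ht]
        simp [Ne.symm ht]

theorem spineRowsF_zero (nr : Int) (h : 2 ≤ nr) :
    ∀ xs, spineRowsF nr (fun _ => (0 : Int)) xs = spineRows nr xs := by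
  intro xs
  induction xs with
  | nil => rfl
  | cons s xs ih =>
    simp only [spineRowsF, spineRows, ih, zero_add]
    congr 1
    by_cases hc : nr - 1 ≤ (xs.count (pyStrRev s) : Int)
    · rw [if_pos hc, if_pos ⟨h, hc⟩]
    · rw [if_neg hc, if_neg (fun hh => hc hh.2)]

-- with num_reps = 0 A's outer loop appends one empty group per remaining index
theorem outerZero (ngrams : List String) :
    ∀ (l : List String) (j : Nat) (res : List (List String)), ngrams.drop j = l →
      (PySem.List.pyRange (j : Int) (PySem.List.len ngrams)).foldl (outerStepA ngrams 0) res =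
        res ++ List.replicate l.length [] := by
  intro l
  induction l with
  | nil =>
    intro j res hdrop
    have hj : ngrams.length ≤ j := by
      by_contra h
      exact absurd hdrop (by simp [List.drop_eq_nil_iff]; omega)
    rw [PySem.List.pyRange_one_eq_nil (by rw [PySem.List.len_eq]; exact_mod_cast hj)]
    simp
  | cons s xs ih =>
    intro j res hdrop
    have hj : j < ngrams.length := by
      by_contra h
      rw [List.drop_eq_nil_iff.mpr (by omega)] at hdrop
      exact (List.cons_ne_nil s xs) hdrop.symm
    have hdrop1 : ngrams.drop (j + 1) = xs := by
      have := congrArg List.tail hdrop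
      simpa [← List.tail_drop] using this
    rw [PySem.List.pyRange_one_cons (by rw [PySem.List.len_eq]; exact_mod_cast hj)]
    rw [List.foldl_cons]
    have hinner : outerStepA ngrams 0 res (j : Int) = res ++ [[]] := by
      unfold outerStepA
      rw [show ((j : Int) + 1) = ((j + 1 : Nat) : Int) by push_cast; ring,
        PySem.List.foldl_pyRange_pyGetD ngrams ""
          (innerCore (PySem.List.pyGetD ngrams (j:Int) "") 0) [] (by positivity),
        Int.toNat_natCast, hdrop1,
        inner_nonpos _ 0 rfl.le xs]
      simp
    rw [hinner,
      show ((j : Int) + 1) = ((j + 1 : Nat) : Int) by push_cast; ring,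
      ih (j + 1) _ hdrop1]
    simp [List.replicate_succ]

theorem main_eq (ngrams : List String) (nr : Int) (h : ¬ (nr = 0 ∧ ngrams ≠ [])) :
    reverse_ngram ngrams nr = reverse_ngram_alt ngrams nr := by
  by_cases h0 : nr = 0
  · subst h0
    have hnil : ngrams = [] := by by_contra hne; exact h ⟨rfl, hne⟩
    subst hnil
    rfl
  · have hA : reverse_ngram ngrams nr = spineRows nr ngrams := by
      have := outerA ngrams nr h0 ngrams 0 [] (by simp)
      simpa [reverse_ngram] using this
    by_cases h2 : nr < 2
    · rw [hA, spineRows_of_lt nr h2 ngrams, reverse_ngram_alt, if_pos h2]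
    · have h2' : 2 ≤ nr := by omega
      rw [hA, reverse_ngram_alt, if_neg h2]
      have hB := (bLoop nr ngrams PySem.Dict.empty []).1
      rw [hB]
      have hemp : (fun t => (PySem.Dict.empty : PySem.Dict String Int).getD t 0)
          = (fun _ => (0 : Int)) := rfl
      rw [hemp, spineRowsF_zero nr h2' ngrams]
      simp

theorem main_ne (ngrams : List String) (nr : Int) (h1 : nr = 0) (h2 : ngrams ≠ []) :
    reverse_ngram ngrams nr ≠ reverse_ngram_alt ngrams nr := by
  subst h1
  have hA : reverse_ngram ngrams 0 = List.replicate ngrams.length [] := by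
    have := outerZero ngrams ngrams 0 [] (by simp)
    simpa [reverse_ngram] using this
  have hB : reverse_ngram_alt ngrams 0 = [] := by rw [reverse_ngram_alt, if_pos (by omega)]
  rw [hA, hB]
  have : ngrams.length ≠ 0 := by simpa using h2
  simp [List.replicate_eq_nil_iff, this]

-- ===== VERDICT (by name: the statement is the Claim_ definition above) =====
theorem reverse_ngram_spec : Claim_unchanged_reverse_ngram := by
  intro ngrams num_reps _ hnD
  exact main_eq ngrams num_reps (by simpa [D_reverse_ngram] using hnD)

theorem reverse_ngram_changed : Claim_changed_reverse_ngram := by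
  unfold Claim_changed_reverse_ngram; decide

theorem reverse_ngram_tight : Claim_exact_reverse_ngram := by
  intro ngrams num_reps _ hD
  exact main_ne ngrams num_reps hD.1 hD.2
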